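-- pv_equiv track=rewrite | github.com/koii-network/prometheus-beta | src/reorder_integers.py | reorder_consecutive_integers
-- ===== SOURCE A (Python) =====
-- def reorder_consecutive_integers(nums):
--     """
--     Reorder a list of integers so that the difference between consecutive
--     elements is always 1, -1, or 0. If impossible, return None.
--
--     Args:
--         nums (list): A list of integers to be reordered
--
--     Returns:
--         list or None: Reordered list or None if reordering is impossible
--     """
--     if not nums:
--         return []
--
--     # Sort the input list to help with reordering
--     nums = sorted(nums)
--     n = len(nums)
--
--     # Try different starting points
--     for start_idx in range(n):
--         result = [nums[start_idx]]
--         used = {start_idx}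
--
--         # Build the reordered list
--         while len(result) < n:
--             # Find the next valid number
--             found_next = False
--             for j in range(n):
--                 if j in used:
--                     continue
--
--                 # Check if the difference is 0, 1, or -1
--                 diff = abs(result[-1] - nums[j])
--                 if diff <= 1:
--                     result.append(nums[j])
--                     used.add(j)
--                     found_next = True
--                     break
--
--             # If no valid next number found, break the attempt
--             if not found_next:
--                 break
--
--         # Check if we successfully reordered the entire list
--         if len(result) == n:
--             return result
--
--     return None
-- ===== SOURCE B (Python) =====
-- def reorder_consecutive_integers(nums):
--     """Sort once; the sorted order works iff every adjacent gap is at most 1."""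
--     s = sorted(nums)
--     if all(b - a <= 1 for a, b in zip(s, s[1:])):
--         return s
--     return None
-- ===== Notes on version B (the rewrite author's own statement) =====
-- stated objective: faster
-- what changed: Replaces A's try-every-start greedy search (sort, then for each start index repeatedly rescan for an unused element within distance 1) by a single sort plus one adjacent-gap scan: the sorted order itself is a valid answer exactly when all adjacent gaps are <= 1, and otherwise no order exists.
import Mathlib
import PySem

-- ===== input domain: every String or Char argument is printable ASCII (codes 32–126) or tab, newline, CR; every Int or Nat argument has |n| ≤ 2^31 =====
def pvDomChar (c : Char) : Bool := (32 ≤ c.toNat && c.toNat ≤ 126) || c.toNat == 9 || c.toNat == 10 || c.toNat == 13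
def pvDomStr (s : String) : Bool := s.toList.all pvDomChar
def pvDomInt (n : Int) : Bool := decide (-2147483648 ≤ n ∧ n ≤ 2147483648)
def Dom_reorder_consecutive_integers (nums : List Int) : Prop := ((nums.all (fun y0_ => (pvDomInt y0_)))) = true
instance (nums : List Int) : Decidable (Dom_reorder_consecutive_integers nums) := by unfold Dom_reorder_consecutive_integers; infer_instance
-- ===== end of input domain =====

-- B replaces A's try-every-start greedy search by a single sort plus one adjacent-gap scan (objective: faster).

-- ===== PORT A =====
-- inner 'for j in range(n)' search: first j not in used with |last - s[j]| <= 1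
-- (every j produced by range(n) satisfies 0 <= j < len(s), so pyGetD is exact here)
def pvFindNext (s : List Int) (n : Int) (used : PySem.Set Int) (last : Int) : Option Int :=
  (PySem.List.pyRange 0 n 1).find? (fun j =>
    !(PySem.Set.contains used j) && decide (|last - PySem.List.pyGetD s j 0| ≤ 1))

-- the 'while len(result) < n' loop; each iteration appends one element or breaks, so fuel n suffices
def pvBuild (s : List Int) (n : Nat) : Nat → List Int → PySem.Set Int → List Int
  | 0, result, _ => result
  | fuel+1, result, used =>
    if result.length < n then
      match pvFindNext s (n : Int) used (PySem.List.pyGetD result (-1) 0) with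
      | some j => pvBuild s n fuel (result ++ [PySem.List.pyGetD s j 0]) (PySem.Set.add used j)
      | none => result
    else result

-- the outer 'for start_idx in range(n)' loop with its early return
def pvOuter (s : List Int) (n : Nat) : List Int → Option (List Int)
  | [] => none
  | start :: rest =>
    let result := pvBuild s n n [PySem.List.pyGetD s start 0] (PySem.Set.ofList [start])
    if result.length = n then some result else pvOuter s n rest

def reorder_consecutive_integers (nums : List Int) : Option (List Int) :=
  if nums = [] then some [] else
    let s := PySem.List.sorted nums (fun x => x) false
    let n := s.length
    pvOuter s n (PySem.List.pyRange 0 (n : Int) 1)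

-- ===== PORT B =====
-- all(b - a <= 1 for a, b in zip(s, s[1:]))
def pvGapsOk : List Int → Bool
  | [] => true
  | [_] => true
  | a :: b :: rest => decide (b - a ≤ 1) && pvGapsOk (b :: rest)

def reorder_consecutive_integers_alt (nums : List Int) : Option (List Int) :=
  let s := PySem.List.sorted nums (fun x => x) false
  if pvGapsOk s then some s else none

-- ===== PRECONDITION & SPEC =====
def Spec_reorder_consecutive_integers (nums : List Int) (out : Option (List Int)) : Prop := out = reorder_consecutive_integers_alt nums
instance (nums : List Int) (out : Option (List Int)) : Decidable (Spec_reorder_consecutive_integers nums out) := by unfold Spec_reorder_consecutive_integers; infer_instance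

-- ===== CLAIM (what is proved, stated in full; the proofs are below) =====
def Claim_equal_reorder_consecutive_integers : Prop := ∀ (nums : List Int), Dom_reorder_consecutive_integers nums → Spec_reorder_consecutive_integers nums (reorder_consecutive_integers nums)

-- ===== LEMMAS AND PROOFS =====
lemma gaps_of_gapsOk (s : List Int) (h : pvGapsOk s = true) :
    ∀ i, (hi : i + 1 < s.length) → s[i+1] - s[i] ≤ 1 := by
  intro i hi
  induction s generalizing i with
  | nil => simp at hi
  | cons a t ih =>
    cases t with
    | nil => simp at hi
    | cons b r =>
      simp only [pvGapsOk, Bool.and_eq_true, decide_eq_true_eq] at h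
      cases i with
      | zero => simpa using h.1
      | succ i =>
        have := ih h.2 i (by simpa using hi)
        simpa using this

lemma gapsOk_false_exists (s : List Int) (h : pvGapsOk s = false) :
    ∃ g, ∃ hg : g + 1 < s.length, 2 ≤ s[g+1] - s[g] := by
  induction s with
  | nil => simp [pvGapsOk] at h
  | cons a t ih =>
    cases t with
    | nil => simp [pvGapsOk] at h
    | cons b r =>
      simp only [pvGapsOk, Bool.and_eq_false_iff, decide_eq_false_iff_not, not_le] at h
      rcases h with h | h
      · exact ⟨0, by simp, by simpa using h⟩
      · obtain ⟨g, hg, h2⟩ := ih h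
        exact ⟨g + 1, by simpa using Nat.succ_lt_succ hg, by simpa using h2⟩

lemma pyGetD_take_neg_one (s : List Int) (k : Nat) (hk : 1 ≤ k) (hkn : k ≤ s.length) :
    PySem.List.pyGetD (s.take k) (-1) 0 = s[k-1]'(by omega) := by
  have h1 : (s.take k).getLast? = some (s[k-1]'(by omega)) := by
    rw [List.getLast?_eq_getElem?]
    simp [List.length_take, List.getElem?_take, Nat.min_eq_left hkn]
    omega
  simp [PySem.List.pyGetD, PySem.List.pyGet?_neg_one, h1]

lemma findNext_eq (s : List Int) (k : Nat) (hk : k < s.length) (used : PySem.Set Int)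
    (hused : ∀ j : Int, PySem.Set.contains used j = true ↔ 0 ≤ j ∧ j < (k : Int))
    (last : Int) (hlast : |last - s[k]| ≤ 1) :
    pvFindNext s (s.length : Int) used last = some (k : Int) := by
  unfold pvFindNext
  rw [PySem.List.pyRange_one_append 0 (k : Int) (s.length : Int) (by omega) (by exact_mod_cast hk.le),
      List.find?_append]
  have h1 : (PySem.List.pyRange 0 (k : Int) 1).find? (fun j =>
      !(PySem.Set.contains used j) && decide (|last - PySem.List.pyGetD s j 0| ≤ 1)) = none := by
    rw [List.find?_eq_none]
    intro j hj
    have := (PySem.List.mem_pyRange_one).mp hj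
    intro hnot
    have hc := (hused j).mpr ⟨this.1, this.2⟩
    simp only [Bool.and_eq_true, Bool.not_eq_true'] at hnot
    rw [hc] at hnot
    simp at hnot
  rw [h1, Option.none_or]
  rw [PySem.List.pyRange_one_cons (by exact_mod_cast hk)]
  rw [List.find?_cons_of_pos]
  simp only [Bool.and_eq_true, Bool.not_eq_true', decide_eq_true_eq]
  constructor
  · rw [← Bool.not_eq_true, hused]; omega
  · rw [PySem.List.pyGetD_natCast]
    simpa [hk] using hlast

lemma build_succ (s : List Int) (hpair : s.Pairwise (· ≤ ·))
    (hgaps : ∀ i, (hi : i + 1 < s.length) → s[i+1] - s[i] ≤ 1) :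
    ∀ fuel k (used : PySem.Set Int), 1 ≤ k → k ≤ s.length → s.length - k ≤ fuel →
    (∀ j : Int, PySem.Set.contains used j = true ↔ 0 ≤ j ∧ j < (k : Int)) →
    pvBuild s s.length fuel (s.take k) used = s := by
  intro fuel
  induction fuel with
  | zero =>
    intro k used hk hkn hfuel hused
    have : k = s.length := by omega
    subst this
    simp [pvBuild]
  | succ fuel ih =>
    intro k used hk hkn hfuel hused
    by_cases hlt : k < s.length
    · have hmono : s[k-1]'(by omega) ≤ s[k] := by
        rw [List.pairwise_iff_getElem] at hpair
        exact hpair _ _ _ _ (by omega)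
      have hgap : s[k] - s[k-1]'(by omega) ≤ 1 := by
        have := hgaps (k-1) (by omega)
        simpa [Nat.sub_add_cancel hk] using this
      have habs : |(s[k-1]'(by omega)) - s[k]| ≤ 1 := by rw [abs_le]; omega
      have hfind := findNext_eq s k hlt used hused (PySem.List.pyGetD (s.take k) (-1) 0)
        (by rw [pyGetD_take_neg_one s k hk hkn]; exact habs)
      have hlen : (s.take k).length = k := by simp [Nat.min_eq_left hkn]
      unfold pvBuild
      rw [if_pos (by rw [hlen]; exact hlt), hfind]
      have hgetk : PySem.List.pyGetD s ((k : Nat) : Int) 0 = s[k] := by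
        rw [PySem.List.pyGetD_natCast]; simp [hlt]
      have htake : s.take k ++ [s[k]] = s.take (k+1) := by
        rw [List.take_add_one]
        simp [List.getElem?_eq_getElem hlt]
      have hkm : ((k:Nat):Int) ∉ used := by
        intro hm
        have hc : PySem.Set.contains used ((k:Nat):Int) = true := by
          simp only [PySem.Set.contains, List.contains_eq_mem, decide_eq_true_eq]
          exact hm
        have := (hused _).mp hc
        omega
      have hadd : PySem.Set.add used ((k:Nat):Int) = used ++ [((k:Nat):Int)] := by
        simp [PySem.Set.add, hkm]
      show pvBuild s s.length fuel (List.take k s ++ [PySem.List.pyGetD s ((k:Nat):Int) 0])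
        (PySem.Set.add used ((k:Nat):Int)) = s
      rw [hgetk, htake, hadd]
      apply ih (k+1) _ (by omega) hlt (by omega)
      intro j
      have hmm : ((used ++ [((k:Nat):Int)]).contains j = true) ↔ (j ∈ used ∨ j = ((k:Nat):Int)) := by
        simp
      have h1 : j ∈ used ↔ 0 ≤ j ∧ j < (k:Int) := by
        rw [← hused j]; simp [PySem.Set.contains]
      rw [hmm, h1]
      push_cast
      omega
    · have : k = s.length := by omega
      subst this
      unfold pvBuild
      rw [if_neg (by simp), List.take_length]

lemma pyGetD_eq_getElem' (s : List Int) (j : Int) (h0 : 0 ≤ j) (hl : j < (s.length : Int)) :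
    PySem.List.pyGetD s j 0 = s[j.toNat]'(by omega) := by
  rw [PySem.List.pyGetD_of_nonneg (h := h0), List.getD_eq_getElem]

lemma sget_mono (s : List Int) (hpair : s.Pairwise (· ≤ ·)) (i j : Nat) (hij : i ≤ j)
    (hj : j < s.length) : s[i]'(by omega) ≤ s[j] := by
  rcases Nat.eq_or_lt_of_le hij with h | h
  · subst h; exact le_refl _
  · rw [List.pairwise_iff_getElem] at hpair
    exact hpair _ _ _ _ h

lemma used_bound (used : List Int) (lo hi : Int) (hlohi : lo ≤ hi) (nd : used.Nodup)
    (hm : ∀ j ∈ used, lo ≤ j ∧ j < hi) : (used.length : Int) ≤ hi - lo := by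
  have sub : used ⊆ PySem.List.pyRange lo hi 1 := by
    intro x hx
    rw [PySem.List.mem_pyRange_one]
    exact hm x hx
  have h2 := (List.Nodup.subperm nd sub).length_le
  rw [PySem.List.length_pyRange_one] at h2
  omega

lemma findNext_some (s : List Int) (n : Int) (used : PySem.Set Int) (last j : Int)
    (h : pvFindNext s n used last = some j) :
    (0 ≤ j ∧ j < n) ∧ j ∉ used ∧ |last - PySem.List.pyGetD s j 0| ≤ 1 := by
  unfold pvFindNext at h
  have hmem := List.mem_of_find?_eq_some h
  have hp := List.find?_some h
  simp only [Bool.and_eq_true, Bool.not_eq_true', decide_eq_true_eq] at hp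
  refine ⟨(PySem.List.mem_pyRange_one).mp hmem, ?_, hp.2⟩
  intro hin
  have : PySem.Set.contains used j = true := by
    simp [PySem.Set.contains, List.contains_eq_mem, hin]
  rw [this] at hp
  exact absurd hp.1 (by simp)

lemma build_stuck_low (s : List Int) (hpair : s.Pairwise (· ≤ ·))
    (g : Nat) (hg : g + 1 < s.length) (hgap : 2 ≤ s[g+1] - s[g]'(by omega)) :
    ∀ fuel (result : List Int) (used : PySem.Set Int),
    result.length = used.length → used.Nodup →
    (∀ j ∈ used, 0 ≤ j ∧ j ≤ (g : Int)) →
    PySem.List.pyGetD result (-1) 0 ≤ s[g]'(by omega) →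
    (pvBuild s s.length fuel result used).length < s.length := by
  intro fuel
  induction fuel with
  | zero =>
    intro result used hlen nd hm hlast
    have := used_bound used 0 ((g:Int)+1) (by omega) nd (by intro j hj; have := hm j hj; omega)
    simp [pvBuild]; omega
  | succ fuel ih =>
    intro result used hlen nd hm hlast
    have hbnd := used_bound used 0 ((g:Int)+1) (by omega) nd (by intro j hj; have := hm j hj; omega)
    unfold pvBuild
    rw [if_pos (by omega)]
    cases hf : pvFindNext s ((s.length : Nat) : Int) used (PySem.List.pyGetD result (-1) 0) with
    | none => simpa using (by omega : result.length < s.length)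
    | some j =>
      obtain ⟨⟨hj0, hjn⟩, hjmem, hjabs⟩ := findNext_some _ _ _ _ _ hf
      have hjlen : j < (s.length : Int) := by exact_mod_cast hjn
      have hget : PySem.List.pyGetD s j 0 = s[j.toNat]'(by omega) := pyGetD_eq_getElem' s j hj0 hjlen
      have hjg : j ≤ (g : Int) := by
        by_contra hc
        push Not at hc
        have h1 : g + 1 ≤ j.toNat := by omega
        have h2 : s[g+1] ≤ s[j.toNat]'(by omega) := sget_mono s hpair _ _ h1 (by omega)
        rw [hget, abs_le] at hjabs
        omega
      have hvle : s[j.toNat]'(by omega) ≤ s[g]'(by omega) := sget_mono s hpair _ _ (by omega) (by omega)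
      have hadd : PySem.Set.add used j = used ++ [j] := by simp [PySem.Set.add, hjmem]
      show (pvBuild s s.length fuel (result ++ [PySem.List.pyGetD s j 0])
        (PySem.Set.add used j)).length < s.length
      rw [hadd]
      apply ih
      · simp [hlen]
      · simpa [List.nodup_append] using ⟨nd, fun a ha he => hjmem (he ▸ ha)⟩
      · intro x hx
        rcases List.mem_append.mp hx with hx | hx
        · exact hm x hx
        · rw [List.mem_singleton] at hx; subst hx; exact ⟨hj0, hjg⟩
      · rw [show PySem.List.pyGetD (result ++ [PySem.List.pyGetD s j 0]) (-1) 0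
              = PySem.List.pyGetD s j 0 by
            simp [PySem.List.pyGetD, PySem.List.pyGet?_neg_one_append_singleton]]
        rw [hget]
        exact hvle

lemma build_stuck_high (s : List Int) (hpair : s.Pairwise (· ≤ ·))
    (g : Nat) (hg : g + 1 < s.length) (hgap : 2 ≤ s[g+1] - s[g]'(by omega)) :
    ∀ fuel (result : List Int) (used : PySem.Set Int),
    result.length = used.length → used.Nodup →
    (∀ j ∈ used, (g : Int) < j ∧ j < (s.length : Int)) →
    s[g+1] ≤ PySem.List.pyGetD result (-1) 0 →
    (pvBuild s s.length fuel result used).length < s.length := by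
  intro fuel
  induction fuel with
  | zero =>
    intro result used hlen nd hm hlast
    have := used_bound used ((g:Int)+1) (s.length : Int) (by omega) nd (by intro j hj; have := hm j hj; omega)
    simp [pvBuild]; omega
  | succ fuel ih =>
    intro result used hlen nd hm hlast
    have hbnd := used_bound used ((g:Int)+1) (s.length : Int) (by omega) nd (by intro j hj; have := hm j hj; omega)
    unfold pvBuild
    rw [if_pos (by omega)]
    cases hf : pvFindNext s ((s.length : Nat) : Int) used (PySem.List.pyGetD result (-1) 0) with
    | none => simpa using (by omega : result.length < s.length)
    | some j =>
      obtain ⟨⟨hj0, hjn⟩, hjmem, hjabs⟩ := findNext_some _ _ _ _ _ hf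
      have hjlen : j < (s.length : Int) := by exact_mod_cast hjn
      have hget : PySem.List.pyGetD s j 0 = s[j.toNat]'(by omega) := pyGetD_eq_getElem' s j hj0 hjlen
      have hjg : (g : Int) < j := by
        by_contra hc
        push Not at hc
        have h1 : j.toNat ≤ g := by omega
        have h2 : s[j.toNat]'(by omega) ≤ s[g]'(by omega) := sget_mono s hpair _ _ h1 (by omega)
        rw [hget, abs_le] at hjabs
        omega
      have hvge : s[g+1] ≤ s[j.toNat]'(by omega) := sget_mono s hpair _ _ (by omega) (by omega)
      have hadd : PySem.Set.add used j = used ++ [j] := by simp [PySem.Set.add, hjmem]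
      show (pvBuild s s.length fuel (result ++ [PySem.List.pyGetD s j 0])
        (PySem.Set.add used j)).length < s.length
      rw [hadd]
      apply ih
      · simp [hlen]
      · simpa [List.nodup_append] using ⟨nd, fun a ha he => hjmem (he ▸ ha)⟩
      · intro x hx
        rcases List.mem_append.mp hx with hx | hx
        · exact hm x hx
        · rw [List.mem_singleton] at hx; subst hx; exact ⟨hjg, hjlen⟩
      · rw [show PySem.List.pyGetD (result ++ [PySem.List.pyGetD s j 0]) (-1) 0
              = PySem.List.pyGetD s j 0 by
            simp [PySem.List.pyGetD, PySem.List.pyGet?_neg_one_append_singleton]]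
        rw [hget]
        exact hvge

lemma singleton_last (v : Int) : PySem.List.pyGetD [v] (-1) 0 = v := by
  simp [PySem.List.pyGetD, PySem.List.pyGet?_neg_one]

lemma outer_fail (s : List Int) (hpair : s.Pairwise (· ≤ ·))
    (g : Nat) (hg : g + 1 < s.length) (hgap : 2 ≤ s[g+1] - s[g]'(by omega)) :
    ∀ starts : List Int, (∀ st ∈ starts, 0 ≤ st ∧ st < (s.length : Int)) →
    pvOuter s s.length starts = none := by
  intro starts
  induction starts with
  | nil => intro _; rfl
  | cons start rest ih =>
    intro h
    obtain ⟨h0, hlt⟩ := h start List.mem_cons_self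
    have hget : PySem.List.pyGetD s start 0 = s[start.toNat]'(by omega) :=
      pyGetD_eq_getElem' s start h0 hlt
    have hof : PySem.Set.ofList [start] = [start] := rfl
    have hstuck : (pvBuild s s.length s.length [PySem.List.pyGetD s start 0]
        (PySem.Set.ofList [start])).length < s.length := by
      rw [hget, hof]
      by_cases hsg : start.toNat ≤ g
      · apply build_stuck_low s hpair g hg hgap
        · simp
        · simp
        · intro j hj; rw [List.mem_singleton] at hj; subst hj; constructor <;> omega
        · rw [singleton_last]; exact sget_mono s hpair _ _ hsg (by omega)
      · apply build_stuck_high s hpair g hg hgap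
        · simp
        · simp
        · intro j hj; rw [List.mem_singleton] at hj; subst hj; constructor <;> omega
        · rw [singleton_last]; exact sget_mono s hpair _ _ (by omega) (by omega)
    simp only [pvOuter]
    rw [if_neg (by omega)]
    exact ih (fun st hst => h st (List.mem_cons_of_mem _ hst))

lemma outer_succ (s : List Int) (hpair : s.Pairwise (· ≤ ·)) (hG : pvGapsOk s = true)
    (hne : s ≠ []) :
    pvOuter s s.length (PySem.List.pyRange 0 (s.length : Int) 1) = some s := by
  have hlen : 0 < s.length := List.length_pos_iff.mpr hne
  rw [PySem.List.pyRange_one_cons (by exact_mod_cast hlen)]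
  have h1 : [PySem.List.pyGetD s (0 : Int) 0] = s.take 1 := by
    cases s with
    | nil => exact absurd rfl hne
    | cons a t => simp [PySem.List.pyGetD]
  have hused : ∀ j : Int, PySem.Set.contains (PySem.Set.ofList [(0:Int)]) j = true ↔
      0 ≤ j ∧ j < ((1:Nat) : Int) := by
    intro j
    show PySem.Set.contains [(0:Int)] j = true ↔ _
    simp [PySem.Set.contains, List.contains_eq_mem]
    omega
  have hb := build_succ s hpair (gaps_of_gapsOk s hG) s.length 1 (PySem.Set.ofList [(0:Int)])
    le_rfl hlen (by omega) hused
  simp only [pvOuter]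
  rw [h1, hb, if_pos rfl]

-- ===== VERDICT (by name: the statement is the Claim_ definition above) =====
theorem reorder_consecutive_integers_spec : Claim_equal_reorder_consecutive_integers := by
  intro nums _
  unfold Spec_reorder_consecutive_integers
  unfold reorder_consecutive_integers reorder_consecutive_integers_alt
  by_cases hnil : nums = []
  · subst hnil; rfl
  · rw [if_neg hnil]
    simp only []
    have hpair : (PySem.List.sorted nums (fun x => x) false).Pairwise (· ≤ ·) := by
      simpa using PySem.List.sorted_pairwise (xs := nums) (key := fun x => x)
    have hne : PySem.List.sorted nums (fun x => x) false ≠ [] := by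
      rw [Ne, PySem.List.sorted_eq_nil_iff]; exact hnil
    cases hG : pvGapsOk (PySem.List.sorted nums (fun x => x) false) with
    | true => rw [outer_succ _ hpair hG hne, if_pos rfl]
    | false =>
      obtain ⟨g, hg, hgap⟩ := gapsOk_false_exists _ hG
      rw [outer_fail _ hpair g hg hgap _ (fun st hst => PySem.List.mem_pyRange_one.mp hst),
        if_neg (by simp)]
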